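-- pv_equiv track=rewrite | github.com/zmydsg/Python_experimental_course | 21点/新21点937分.py | dealer_strategy
-- ===== SOURCE A (Python) =====
-- CARD_VALUES = {
--     '2': 2, '3': 3, '4': 4, '5': 5, '6': 6, '7': 7, '8': 8, '9': 9, '10': 10,
--     'J': 10, 'Q': 10, 'K': 10, 'A': 11
-- }
--
-- def dealer_strategy(hand, dealer_card, deck_info=None):
--     value = 0
--     aces = 0
--
--     for card in hand:
--         if card == 'A':
--             aces += 1
--             value += 11
--         else:
--             value += CARD_VALUES[card]
--
--     while value > 21 and aces > 0:
--         value -= 10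
--         aces -= 1
--
--     return value < 17
-- ===== SOURCE B (Python) =====
-- CARD_VALUES = {
--     '2': 2, '3': 3, '4': 4, '5': 5, '6': 6, '7': 7, '8': 8, '9': 9, '10': 10,
--     'J': 10, 'Q': 10, 'K': 10, 'A': 11
-- }
--
-- def dealer_strategy(hand, dealer_card, deck_info=None):
--     # base total with every ace counted as 1; closed-form upgrade of one ace to 11
--     base = sum(1 if card == 'A' else CARD_VALUES[card] for card in hand)
--     aces = hand.count('A')
--     value = base + 10 if aces > 0 and base + 10 <= 21 else base
--     return value < 17
-- ===== Notes on version B (the rewrite author's own statement) =====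
-- stated objective: simpler
-- what changed: Replaces the 11-per-ace accumulation plus while-loop demotion with a single pass counting aces as 1 and a closed-form conditional (+10 if an ace fits), since at most one ace can ever count as 11.
import Mathlib
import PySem

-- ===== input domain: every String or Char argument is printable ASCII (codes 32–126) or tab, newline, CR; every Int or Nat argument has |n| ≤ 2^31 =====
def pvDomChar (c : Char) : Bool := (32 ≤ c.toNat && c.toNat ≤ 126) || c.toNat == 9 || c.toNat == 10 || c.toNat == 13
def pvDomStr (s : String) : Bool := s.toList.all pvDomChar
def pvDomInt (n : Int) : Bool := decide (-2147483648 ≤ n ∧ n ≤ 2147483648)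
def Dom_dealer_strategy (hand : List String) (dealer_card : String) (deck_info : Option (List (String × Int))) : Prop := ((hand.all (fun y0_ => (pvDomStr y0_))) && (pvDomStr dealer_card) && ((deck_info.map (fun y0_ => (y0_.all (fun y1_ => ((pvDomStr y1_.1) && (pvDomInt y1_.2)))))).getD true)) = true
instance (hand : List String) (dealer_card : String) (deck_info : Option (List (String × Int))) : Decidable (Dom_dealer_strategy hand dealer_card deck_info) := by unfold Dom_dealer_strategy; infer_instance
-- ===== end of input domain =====

-- B replaces A's 11-per-ace accumulation plus while-loop demotion by a single pass
-- (aces counted as 1) and a closed-form conditional (+10 when one ace fits); objective: simpler.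

-- module-level constant CARD_VALUES (shared by both Pythons)
def CARD_VALUES : PySem.Dict String Int :=
  ⟨[("2", 2), ("3", 3), ("4", 4), ("5", 5), ("6", 6), ("7", 7), ("8", 8), ("9", 9),
    ("10", 10), ("J", 10), ("Q", 10), ("K", 10), ("A", 11)]⟩

-- ===== PORT A =====
-- the while-loop: while value > 21 and aces > 0: value -= 10; aces -= 1
def dealerReduce (value aces : Int) : Int :=
  if value > 21 ∧ aces > 0 then dealerReduce (value - 10) (aces - 1) else value
termination_by aces.toNat
decreasing_by omega

def dealer_strategy (hand : List String) (dealer_card : String) (deck_info : Option (List (String × Int))) : Bool :=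
  -- the for-loop accumulating (value, aces); CARD_VALUES[card] raises KeyError on unknown
  -- cards (excluded by Pre_); getD 0 stands in for the raising lookup there
  let st := hand.foldl (fun (s : Int × Int) card =>
      if card = "A" then (s.1 + 11, s.2 + 1)
      else (s.1 + PySem.Dict.getD CARD_VALUES card 0, s.2)) (0, 0)
  dealerReduce st.1 st.2 < 17

-- ===== PORT B =====
def dealer_strategy_alt (hand : List String) (dealer_card : String) (deck_info : Option (List (String × Int))) : Bool :=
  let base := (hand.map (fun card => if card = "A" then (1 : Int) else PySem.Dict.getD CARD_VALUES card 0)).sum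
  let aces : Int := PySem.List.count hand "A"
  let value := if aces > 0 ∧ base + 10 ≤ 21 then base + 10 else base
  value < 17

-- ===== PRECONDITION & SPEC =====
-- Pre_ excludes exactly the hands containing a card not in CARD_VALUES, on which both
-- Pythons raise KeyError.
def Pre_dealer_strategy (hand : List String) (dealer_card : String) (deck_info : Option (List (String × Int))) : Prop :=
  ∀ c ∈ hand, (PySem.Dict.get? CARD_VALUES c).isSome
instance (hand : List String) (dealer_card : String) (deck_info : Option (List (String × Int))) : Decidable (Pre_dealer_strategy hand dealer_card deck_info) := by unfold Pre_dealer_strategy; infer_instance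
def pvWitness_dealer_strategy : List String × String × (Option (List (String × Int))) := (["A", "K", "3"], "9", none)

def Spec_dealer_strategy (hand : List String) (dealer_card : String) (deck_info : Option (List (String × Int))) (out : Bool) : Prop := out = dealer_strategy_alt hand dealer_card deck_info
instance (hand : List String) (dealer_card : String) (deck_info : Option (List (String × Int))) (out : Bool) : Decidable (Spec_dealer_strategy hand dealer_card deck_info out) := by unfold Spec_dealer_strategy; infer_instance

-- ===== CLAIM (what is proved, stated in full; the proofs are below) =====
def Claim_equal_dealer_strategy : Prop := ∀ (hand : List String) (dealer_card : String) (deck_info : Option (List (String × Int))), Dom_dealer_strategy hand dealer_card deck_info → Pre_dealer_strategy hand dealer_card deck_info → Spec_dealer_strategy hand dealer_card deck_info (dealer_strategy hand dealer_card deck_info)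

-- ===== LEMMAS AND PROOFS =====

-- each card present in CARD_VALUES has value ≥ 2
lemma card_value_ge_two (c : String) (h : (PySem.Dict.get? CARD_VALUES c).isSome) :
    2 ≤ PySem.Dict.getD CARD_VALUES c 0 := by
  obtain ⟨v, hv⟩ := Option.isSome_iff_exists.mp h
  rw [PySem.Dict.getD_eq_get?_getD, hv]
  have hm := PySem.Dict.mem_items_of_get?_eq_some CARD_VALUES hv
  simp only [CARD_VALUES, List.mem_cons, List.not_mem_nil, or_false, Prod.mk.injEq] at hm
  rcases hm with ⟨_, rfl⟩|⟨_, rfl⟩|⟨_, rfl⟩|⟨_, rfl⟩|⟨_, rfl⟩|⟨_, rfl⟩|⟨_, rfl⟩|⟨_, rfl⟩|⟨_, rfl⟩|⟨_, rfl⟩|⟨_, rfl⟩|⟨_, rfl⟩|⟨_, rfl⟩ <;> norm_num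

-- A's fold from (v, a) lands at (v + base + 10*aces, a + aces), with B's base and aces
lemma foldA_eq (hand : List String) : ∀ v a : Int,
    hand.foldl (fun (s : Int × Int) card =>
      if card = "A" then (s.1 + 11, s.2 + 1)
      else (s.1 + PySem.Dict.getD CARD_VALUES card 0, s.2)) (v, a)
    = (v + (hand.map (fun card => if card = "A" then (1 : Int) else PySem.Dict.getD CARD_VALUES card 0)).sum
         + 10 * (PySem.List.count hand "A" : Int),
       a + (PySem.List.count hand "A" : Int)) := by
  induction hand with
  | nil => intro v a; simp [PySem.List.count_eq]
  | cons c t ih =>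
    intro v a
    rw [List.foldl_cons]
    by_cases hc : c = "A"
    · rw [if_pos hc, ih]
      simp only [List.map_cons, List.sum_cons, PySem.List.count_eq, List.count_cons, hc,
        if_true, beq_self_eq_true, ite_true, Prod.mk.injEq]
      constructor <;> push_cast <;> ring
    · rw [if_neg hc, ih]
      have hne : ¬ (c == "A") = true := by simpa using hc
      simp only [List.map_cons, List.sum_cons, PySem.List.count_eq, List.count_cons,
        if_neg hc, hne, ite_false, Prod.mk.injEq]
      constructor <;> push_cast <;> ring

-- base ≥ aces when every card in hand is a CARD_VALUES key
lemma base_ge_count (hand : List String) (h : ∀ c ∈ hand, (PySem.Dict.get? CARD_VALUES c).isSome) :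
    (PySem.List.count hand "A" : Int) ≤
      (hand.map (fun card => if card = "A" then (1 : Int) else PySem.Dict.getD CARD_VALUES card 0)).sum := by
  induction hand with
  | nil => simp [PySem.List.count_eq]
  | cons c t ih =>
    have h1 := h c (List.mem_cons_self ..)
    have ih' := ih (fun x hx => h x (List.mem_cons_of_mem _ hx))
    have h2 := card_value_ge_two c h1
    by_cases hc : c = "A"
    · simp only [List.map_cons, List.sum_cons, PySem.List.count_eq, List.count_cons, hc,
        beq_self_eq_true, ite_true, if_true] at ih' ⊢
      push_cast at ih' ⊢
      omega
    · simp only [List.map_cons, List.sum_cons, PySem.List.count_eq, List.count_cons,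
        if_neg hc] at ih' ⊢
      have hne : (c == "A") = false := by simpa using hc
      rw [hne]
      push_cast
      omega

-- the while-loop stops immediately when no aces remain
lemma reduce_zero (v : Int) : dealerReduce v 0 = v := by
  rw [dealerReduce]; simp

-- the while-loop's result from the state (base + 10*aces, aces), in closed form
lemma reduce_closed_nat (n : Nat) : ∀ base : Int, (n : Int) ≤ base →
    dealerReduce (base + 10 * n) n = if (n : Int) > 0 ∧ base + 10 ≤ 21 then base + 10 else base := by
  induction n with
  | zero =>
    intro base _
    rw [dealerReduce]
    simp
  | succ m ih =>
    intro base hb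
    rcases Nat.eq_zero_or_pos m with hm | hm
    · subst hm
      rw [dealerReduce]
      by_cases hle : base + 10 ≤ 21
      · rw [if_neg (by omega), if_pos ⟨by omega, hle⟩]
        omega
      · rw [if_pos ⟨by omega, by omega⟩, if_neg (fun h => hle h.2)]
        have h0 : base + 10 * ((0 + 1 : Nat) : Int) - 10 = base := by omega
        have h1 : ((0 + 1 : Nat) : Int) - 1 = ((0 : Nat) : Int) := by omega
        rw [h0, h1]
        simpa using reduce_zero base
    · have hbig : base + 10 * ((m + 1 : Nat) : Int) > 21 ∧ ((m + 1 : Nat) : Int) > 0 := by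
        constructor <;> push_cast at hb ⊢ <;> omega
      rw [dealerReduce, if_pos hbig]
      have h0 : base + 10 * ((m + 1 : Nat) : Int) - 10 = base + 10 * ((m : Nat) : Int) := by
        push_cast; ring
      have h1 : ((m + 1 : Nat) : Int) - 1 = ((m : Nat) : Int) := by omega
      rw [h0, h1, ih base (by push_cast at hb ⊢; omega)]
      by_cases hle : base + 10 ≤ 21
      · rw [if_pos ⟨by omega, hle⟩, if_pos ⟨by push_cast; omega, hle⟩]
      · rw [if_neg (fun h => hle h.2), if_neg (fun h => hle h.2)]

-- ===== VERDICT (by name: the statement is the Claim_ definition above) =====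
theorem dealer_strategy_spec : Claim_equal_dealer_strategy := by
  intro hand dealer_card deck_info _ hpre
  unfold Spec_dealer_strategy dealer_strategy dealer_strategy_alt
  rw [foldA_eq hand 0 0]
  simp only [zero_add]
  rw [reduce_closed_nat _ _ (base_ge_count hand hpre)]
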